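-- pv_equiv track=rewrite | github.com/CrosswaveOmega/NikkiBot | cogs/SetupCog.py | format_resolved_permissions
-- ===== SOURCE A (Python) =====
-- def format_resolved_permissions(resolved_permissions):
--     """format resolved permissions for a particular channel group."""
--     groups = {}
--     for num, perm, overtype, name, case in resolved_permissions:
--         key = (num, name)
--         if key not in groups:
--             groups[key] = []
--         groups[key].append((perm, case))
--     stringval = ""
--     for group_key in sorted(groups.keys()):
--         num, name = group_key
--         stringval += f"\n{num} ({name}):\n"
--         allow = ",".join(
--             [f"`{i}`" for i, e in sorted(groups[group_key]) if e == "allow"]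
--         )
--         deny = ",".join(
--             [f"`{i}`" for i, e in sorted(groups[group_key]) if e == "deny"]
--         )
--         if allow:
--             stringval += f"**allowed:**{allow}\n"
--         if deny:
--             stringval += f"**denied:**{deny}\n"
--     if len(stringval) > 4025:
--         stringval = (
--             stringval[:4020]
--             + "...\n There are too many overwrites here for me to list!"
--         )
--     return stringval
-- ===== SOURCE B (Python) =====
-- def format_resolved_permissions(resolved_permissions):
--     """format resolved permissions for a particular channel group."""
--     # One stable multi-pass sort (by (perm, case), then by (num, name)) makes the
--     # channel groups consecutive runs that are already ordered inside; a single
--     # linear scan then formats each run without any dict or per-group sorting.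
--     rows = sorted(sorted(resolved_permissions, key=lambda r: (r[1], r[4])),
--                   key=lambda r: (r[0], r[3]))
--     parts = []
--     i = 0
--     n = len(rows)
--     while i < n:
--         num, name = rows[i][0], rows[i][3]
--         j = i
--         while j < n and rows[j][0] == num and rows[j][3] == name:
--             j += 1
--         group = rows[i:j]
--         allow = ",".join("`" + r[1] + "`" for r in group if r[4] == "allow")
--         deny = ",".join("`" + r[1] + "`" for r in group if r[4] == "deny")
--         parts.append("\n%d (%s):\n" % (num, name))
--         if allow:
--             parts.append("**allowed:**" + allow + "\n")
--         if deny: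
--             parts.append("**denied:**" + deny + "\n")
--         i = j
--     stringval = "".join(parts)
--     if len(stringval) > 4025:
--         stringval = (
--             stringval[:4020]
--             + "...\n There are too many overwrites here for me to list!"
--         )
--     return stringval
-- ===== Notes on version B (the rewrite author's own statement) =====
-- stated objective: alternative
-- what changed: Replaces A's dict-grouping with per-group sorts by one stable multi-pass sort of all rows (by (perm,case), then by (num,name)) followed by a single linear scan that formats each consecutive (num,name) run, partitioning allow/deny by filters instead of sorting inside each group.
import Mathlib
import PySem

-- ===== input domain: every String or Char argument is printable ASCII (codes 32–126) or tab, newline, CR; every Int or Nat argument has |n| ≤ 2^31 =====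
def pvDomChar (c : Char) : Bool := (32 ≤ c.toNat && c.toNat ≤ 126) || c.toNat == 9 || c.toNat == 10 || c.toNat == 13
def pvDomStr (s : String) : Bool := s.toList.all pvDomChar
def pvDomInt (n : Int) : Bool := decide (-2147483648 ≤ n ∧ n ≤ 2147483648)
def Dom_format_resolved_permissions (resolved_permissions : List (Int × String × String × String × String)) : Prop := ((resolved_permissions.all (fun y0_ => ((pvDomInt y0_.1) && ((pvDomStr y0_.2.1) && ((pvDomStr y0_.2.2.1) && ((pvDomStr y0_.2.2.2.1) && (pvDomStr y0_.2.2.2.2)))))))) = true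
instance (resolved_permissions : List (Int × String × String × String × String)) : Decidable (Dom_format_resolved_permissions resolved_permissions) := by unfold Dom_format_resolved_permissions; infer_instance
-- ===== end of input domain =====

-- B groups by ONE stable multi-pass sort plus a linear scan instead of A's dict + per-group sorts; return values proved equal (objective: alternative decomposition).

-- ===== PORT A =====
-- body of A's grouping 'for' loop, named so the proofs can speak about it (same steps as the Python)
def pvStepA (groups : PySem.Dict (Int × String) (List (String × String)))
    (r : Int × String × String × String × String) :
    PySem.Dict (Int × String) (List (String × String)) :=
  let key := (r.1, r.2.2.2.1)
  let groups := if groups.contains key then groups else groups.insert key []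
  groups.modify key [] (fun l => l ++ [(r.2.1, r.2.2.2.2)])

def format_resolved_permissions (resolved_permissions : List (Int × String × String × String × String)) : String :=
  let groups := resolved_permissions.foldl pvStepA PySem.Dict.empty
  let stringval := (PySem.List.sorted2 groups.keys Prod.fst Prod.snd).foldl (fun stringval gk =>
    let allow := PySem.Str.join ","
      (((PySem.List.sorted2 (groups.getD gk []) Prod.fst Prod.snd).filter
          (fun p => p.2 == "allow")).map (fun p => "`" ++ p.1 ++ "`"))
    let deny := PySem.Str.join ","
      (((PySem.List.sorted2 (groups.getD gk []) Prod.fst Prod.snd).filter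
          (fun p => p.2 == "deny")).map (fun p => "`" ++ p.1 ++ "`"))
    let stringval := stringval ++ "\n" ++ PySem.Int.toStr gk.1 ++ " (" ++ gk.2 ++ "):\n"
    let stringval := if allow ≠ "" then stringval ++ "**allowed:**" ++ allow ++ "\n" else stringval
    if deny ≠ "" then stringval ++ "**denied:**" ++ deny ++ "\n" else stringval) ""
  if PySem.Str.len stringval > 4025 then
    PySem.Str.slice stringval none (some 4020) ++ "...\n There are too many overwrites here for me to list!"
  else stringval

-- ===== PORT B =====
-- Source B's outer 'while i < n' scan over the sorted rows: one run of equal (num, name) per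
-- step; the inner 'while j < n and …' bound scan is ported as takeWhile/dropWhile (exact)
def pvEmit : List (Int × String × String × String × String) → String
  | [] => ""
  | r :: t =>
    let same : (Int × String × String × String × String) → Bool :=
      fun x => x.1 == r.1 && x.2.2.2.1 == r.2.2.2.1
    let group := r :: t.takeWhile same
    let allow := PySem.Str.join ","
      ((group.filter (fun x => x.2.2.2.2 == "allow")).map (fun x => "`" ++ x.2.1 ++ "`"))
    let deny := PySem.Str.join ","
      ((group.filter (fun x => x.2.2.2.2 == "deny")).map (fun x => "`" ++ x.2.1 ++ "`"))
    let part := "\n" ++ PySem.Int.toStr r.1 ++ " (" ++ r.2.2.2.1 ++ "):\n"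
    let part := if allow ≠ "" then part ++ "**allowed:**" ++ allow ++ "\n" else part
    let part := if deny ≠ "" then part ++ "**denied:**" ++ deny ++ "\n" else part
    part ++ pvEmit (t.dropWhile same)
termination_by rows => rows.length
decreasing_by
  simp only [List.length_cons]
  exact Nat.lt_succ_of_le (List.length_dropWhile_le _ _)

def format_resolved_permissions_alt (resolved_permissions : List (Int × String × String × String × String)) : String :=
  let rows := PySem.List.sorted2
      (PySem.List.sorted2 resolved_permissions (fun r => r.2.1) (fun r => r.2.2.2.2))
      (fun r => r.1) (fun r => r.2.2.2.1)
  let stringval := pvEmit rows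
  if PySem.Str.len stringval > 4025 then
    PySem.Str.slice stringval none (some 4020) ++ "...\n There are too many overwrites here for me to list!"
  else stringval

-- ===== PRECONDITION & SPEC =====
def Spec_format_resolved_permissions (resolved_permissions : List (Int × String × String × String × String)) (out : String) : Prop := out = format_resolved_permissions_alt resolved_permissions
instance (resolved_permissions : List (Int × String × String × String × String)) (out : String) : Decidable (Spec_format_resolved_permissions resolved_permissions out) := by unfold Spec_format_resolved_permissions; infer_instance

-- ===== CLAIM (what is proved, stated in full; the proofs are below) =====
def Claim_equal_format_resolved_permissions : Prop := ∀ (resolved_permissions : List (Int × String × String × String × String)), Dom_format_resolved_permissions resolved_permissions → Spec_format_resolved_permissions resolved_permissions (format_resolved_permissions resolved_permissions)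

-- ===== LEMMAS AND PROOFS =====

-- ---- generic facts about PySem's stable insertion sort ----

theorem pv_insertBy_append_not {α : Type} (bef : α → α → Bool) (x : α) (pre l : List α)
    (h : ∀ y ∈ pre, bef x y = false) :
    PySem.List.insertBy bef x (pre ++ l) = pre ++ PySem.List.insertBy bef x l := by
  induction pre with
  | nil => rfl
  | cons y ys ih =>
    have hy : bef x y = false := h y (by simp)
    simp only [List.cons_append, PySem.List.insertBy, hy, Bool.false_eq_true, if_false]
    exact congrArg (y :: ·) (ih fun z hz => h z (by simp [hz]))

theorem pv_insertBy_cons {α : Type} (bef : α → α → Bool) (x : α) (l : List α)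
    (h : ∀ y ∈ l, bef x y = true) :
    PySem.List.insertBy bef x l = x :: l := by
  cases l with
  | nil => rfl
  | cons y ys => simp [PySem.List.insertBy, h y (by simp)]

theorem pv_insertBy_flatMap {α κ : Type} [LinearOrder κ] (key : α → κ) (x : α)
    (ks : List κ) (g : κ → List α)
    (hg : ∀ k, ∀ y ∈ g k, key y = k) (hs : ks.Pairwise (· < ·)) (hx : key x ∈ ks) :
    PySem.List.insertBy (fun a b => decide (key a < key b)) x (ks.flatMap g)
      = ks.flatMap (fun k => if k = key x then g k ++ [x] else g k) := by
  induction ks with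
  | nil => simp at hx
  | cons k ks ih =>
    simp only [List.flatMap_cons]
    by_cases hk : k = key x
    · have h1 : ∀ y ∈ g k, (fun a b => decide (key a < key b)) x y = false := by
        intro y hy
        have := hg k y hy
        simp [this, hk]
      rw [pv_insertBy_append_not _ _ _ _ h1]
      have h2 : ∀ y ∈ ks.flatMap g, (fun a b => decide (key a < key b)) x y = true := by
        intro y hy
        rcases List.mem_flatMap.mp hy with ⟨k', hk', hy'⟩
        have hkk' : k < k' := (List.pairwise_cons.mp hs).1 k' hk'
        have := hg k' y hy'
        simp [this, ← hk, hkk']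
      rw [pv_insertBy_cons _ _ _ h2]
      have h3 : ks.flatMap (fun k' => if k' = key x then g k' ++ [x] else g k') = ks.flatMap g :=
        List.flatMap_congr (fun k' hk' => by
          have hkk' : k < k' := (List.pairwise_cons.mp hs).1 k' hk'
          rw [if_neg (fun (h : k' = key x) => (ne_of_gt hkk') (by rw [hk, h]))])
      rw [if_pos hk, h3]
      simp
    · have hx' : key x ∈ ks := by
        rcases List.mem_cons.mp hx with h | h
        · exact absurd h.symm hk
        · exact h
      have hlt : k < key x := by
        rcases List.mem_cons.mp hx with h | h
        · exact absurd h.symm hk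
        · exact (List.pairwise_cons.mp hs).1 _ h
      have h1 : ∀ y ∈ g k, (fun a b => decide (key a < key b)) x y = false := by
        intro y hy
        have := hg k y hy
        simp [this, not_lt_of_gt hlt]
      rw [pv_insertBy_append_not _ _ _ _ h1]
      rw [ih (List.pairwise_cons.mp hs).2 hx', if_neg hk]

-- a stable sort is the concatenation, over any strictly increasing list of keys covering
-- the input, of the key-classes in input order
theorem pv_sorted_flatMap {α κ : Type} [LinearOrder κ] (xs : List α) (key : α → κ)
    (ks : List κ) (hs : ks.Pairwise (· < ·)) (hmem : ∀ x ∈ xs, key x ∈ ks) :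
    PySem.List.sorted xs key = ks.flatMap (fun k => xs.filter (fun x => decide (key x = k))) := by
  induction xs using List.reverseRecOn with
  | nil => simp [PySem.List.sorted_eq_foldl_insertBy]
  | append_singleton l a ih =>
    rw [PySem.List.sorted_eq_foldl_insertBy, List.foldl_append, List.foldl_cons, List.foldl_nil,
      ← PySem.List.sorted_eq_foldl_insertBy, ih (fun x hx => hmem x (by simp [hx]))]
    rw [pv_insertBy_flatMap key a ks _ (fun k y hy => by
        have := (List.mem_filter.mp hy).2; exact of_decide_eq_true this)
      hs (hmem a (by simp))]
    exact List.flatMap_congr (fun k hk => by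
      by_cases h : k = key a
      · subst h
        simp [List.filter_append]
      · have h' : ¬ key a = k := fun hh => h hh.symm
        simp [List.filter_append, h, h'])

-- filtering commutes with a stable sort
theorem pv_filter_sorted {α κ : Type} [LinearOrder κ] [BEq κ] [LawfulBEq κ]
    (xs : List α) (key : α → κ) (q : α → Bool) :
    (PySem.List.sorted xs key).filter q = PySem.List.sorted (xs.filter q) key := by
  classical
  set ks := PySem.List.sorted (PySem.Set.ofList (xs.map key)) (fun k => k) with hksdef
  have hs : ks.Pairwise (· < ·) := PySem.List.sorted_ofList_pairwise_lt _
  have hmem : ∀ x ∈ xs, key x ∈ ks := fun x hx => by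
    rw [hksdef, PySem.List.mem_sorted, PySem.Set.mem_ofList]
    exact List.mem_map_of_mem hx
  rw [pv_sorted_flatMap xs key ks hs hmem,
    pv_sorted_flatMap (xs.filter q) key ks hs (fun x hx => hmem x (List.mem_of_mem_filter hx)),
    List.filter_flatMap]
  exact List.flatMap_congr (fun k hk => by
    rw [List.filter_filter, List.filter_filter]
    exact List.filter_congr (fun x hx => Bool.and_comm _ _))

theorem pv_map_insertBy {α β : Type} (f : α → β) (bef : α → α → Bool) (bef' : β → β → Bool)
    (h : ∀ a b, bef a b = bef' (f a) (f b)) (x : α) (l : List α) :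
    (PySem.List.insertBy bef x l).map f = PySem.List.insertBy bef' (f x) (l.map f) := by
  induction l with
  | nil => rfl
  | cons y ys ih =>
    by_cases hxy : bef x y = true
    · simp [PySem.List.insertBy, hxy, ← h]
    · simp only [Bool.not_eq_true] at hxy
      simp [PySem.List.insertBy, hxy, ← h, ih]

-- mapping commutes with a stable sort when the key factors through the map
theorem pv_map_sorted {α β κ : Type} [LinearOrder κ] (f : α → β) (keyα : α → κ) (keyβ : β → κ)
    (h : ∀ a, keyα a = keyβ (f a)) (xs : List α) :
    (PySem.List.sorted xs keyα).map f = PySem.List.sorted (xs.map f) keyβ := by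
  induction xs using List.reverseRecOn with
  | nil => simp [PySem.List.sorted_eq_foldl_insertBy]
  | append_singleton l a ih =>
    rw [PySem.List.sorted_eq_foldl_insertBy, List.foldl_append, List.foldl_cons, List.foldl_nil,
      ← PySem.List.sorted_eq_foldl_insertBy,
      pv_map_insertBy f _ (fun a b => decide (keyβ a < keyβ b)) (fun a b => by rw [h, h]) a _,
      ih, List.map_append, List.map_cons, List.map_nil,
      PySem.List.sorted_eq_foldl_insertBy (l.map f ++ [f a]), List.foldl_append,
      List.foldl_cons, List.foldl_nil, ← PySem.List.sorted_eq_foldl_insertBy]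

-- sorting with a Python tuple key is sorting by the lexicographic product key
theorem pv_sorted2_eq {α κ₁ κ₂ : Type} [LinearOrder κ₁] [LinearOrder κ₂]
    (xs : List α) (k1 : α → κ₁) (k2 : α → κ₂) :
    PySem.List.sorted2 xs k1 k2 = PySem.List.sorted xs (fun x => toLex (k1 x, k2 x)) := by
  show List.foldl _ [] xs = _
  rw [PySem.List.sorted_eq_foldl_insertBy]
  have : (fun (a b : α) => decide (k1 a < k1 b) || (!decide (k1 b < k1 a) && decide (k2 a < k2 b)))
      = (fun a b => decide (toLex (k1 a, k2 a) < toLex (k1 b, k2 b))) := by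
    funext a b
    rcases lt_trichotomy (k1 a) (k1 b) with h | h | h
    · simp [h, Prod.Lex.toLex_lt_toLex]
    · simp [h, Prod.Lex.toLex_lt_toLex]
    · simp [h, not_lt_of_gt h, Prod.Lex.toLex_lt_toLex, ne_of_gt h]
  rw [this]
  simp

-- ---- characterisation of A's grouping dict ----

theorem pv_stepA_eq (d : PySem.Dict (Int × String) (List (String × String)))
    (r : Int × String × String × String × String) :
    pvStepA d r = d.modify (r.1, r.2.2.2.1) [] (fun l => l ++ [(r.2.1, r.2.2.2.2)]) := by
  unfold pvStepA
  by_cases h : d.contains (r.1, r.2.2.2.1)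
  · simp [h]
  · simp only [h, Bool.false_eq_true, if_false, PySem.Dict.modify,
      PySem.Dict.getD_insert_self, PySem.Dict.insert_insert_self,
      PySem.Dict.getD_of_not_contains _ _ (by simpa using h)]

theorem pv_foldA_eq (rp : List (Int × String × String × String × String))
    (d : PySem.Dict (Int × String) (List (String × String))) :
    rp.foldl pvStepA d
      = rp.foldl (fun d r => d.modify (r.1, r.2.2.2.1) [] (fun l => l ++ [(r.2.1, r.2.2.2.2)])) d := by
  have : pvStepA = fun d r => d.modify (r.1, r.2.2.2.1) [] (fun l => l ++ [(r.2.1, r.2.2.2.2)]) :=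
    funext fun d => funext fun r => pv_stepA_eq d r
  rw [this]

theorem pv_groups_keys (rp : List (Int × String × String × String × String)) :
    (rp.foldl pvStepA PySem.Dict.empty).keys
      = PySem.Set.ofList (rp.map (fun r => (r.1, r.2.2.2.1))) := by
  rw [pv_foldA_eq,
    PySem.Dict.keys_foldl_modify_key rp (fun r => (r.1, r.2.2.2.1)) []
      (fun _ r => fun l => l ++ [(r.2.1, r.2.2.2.2)]) PySem.Dict.empty]
  rfl

theorem pv_groups_getD (rp : List (Int × String × String × String × String)) (k : Int × String) :
    (rp.foldl pvStepA PySem.Dict.empty).getD k []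
      = (rp.filter (fun r => (r.1, r.2.2.2.1) == k)).map (fun r => (r.2.1, r.2.2.2.2)) := by
  rw [pv_foldA_eq]
  have h := PySem.Dict.getD_foldl_modify_append
    (rp.map (fun r => ((r.1, r.2.2.2.1), (r.2.1, r.2.2.2.2)))) PySem.Dict.empty k
  rw [List.foldl_map] at h
  simpa [List.filter_map, List.map_map, Function.comp_def, PySem.Dict.getD_empty] using h

-- ---- small list/string helpers ----

theorem pv_foldl_append_str {κ : Type} (h : κ → String) (l : List κ) (s0 : String) :
    l.foldl (fun s k => s ++ h k) s0 = s0 ++ l.foldr (fun k acc => h k ++ acc) "" := by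
  induction l generalizing s0 with
  | nil => simp [String.append_empty]
  | cons k ks ih => simp [ih, String.append_assoc]

theorem pv_takeWhile_append_all {α : Type} (p : α → Bool) (l l' : List α)
    (h : ∀ y ∈ l, p y = true) : (l ++ l').takeWhile p = l ++ l'.takeWhile p := by
  induction l with
  | nil => rfl
  | cons y ys ih =>
    simp only [List.cons_append, List.takeWhile_cons, h y (by simp)]
    exact congrArg (y :: ·) (ih fun z hz => h z (by simp [hz]))

theorem pv_dropWhile_append_all {α : Type} (p : α → Bool) (l l' : List α)
    (h : ∀ y ∈ l, p y = true) : (l ++ l').dropWhile p = l'.dropWhile p := by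
  induction l with
  | nil => rfl
  | cons y ys ih =>
    simp only [List.cons_append, List.dropWhile_cons, h y (by simp), if_true]
    exact ih fun z hz => h z (by simp [hz])

theorem pv_takeWhile_all_false {α : Type} (p : α → Bool) (l : List α)
    (h : ∀ y ∈ l, p y = false) : l.takeWhile p = [] := by
  cases l with
  | nil => rfl
  | cons y ys => simp [h y (by simp)]

theorem pv_dropWhile_all_false {α : Type} (p : α → Bool) (l : List α)
    (h : ∀ y ∈ l, p y = false) : l.dropWhile p = l := by
  cases l with
  | nil => rfl
  | cons y ys => simp [h y (by simp)]

-- ---- the common normal form both programs reach ----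

-- the formatted block of one (num, name) group, given the group's rows
def pvGroupStr (k : Int × String)
    (group : List (Int × String × String × String × String)) : String :=
  let allow := PySem.Str.join ","
    ((group.filter (fun x => x.2.2.2.2 == "allow")).map (fun x => "`" ++ x.2.1 ++ "`"))
  let deny := PySem.Str.join ","
    ((group.filter (fun x => x.2.2.2.2 == "deny")).map (fun x => "`" ++ x.2.1 ++ "`"))
  let part := "\n" ++ PySem.Int.toStr k.1 ++ " (" ++ k.2 ++ "):\n"
  let part := if allow ≠ "" then part ++ "**allowed:**" ++ allow ++ "\n" else part
  if deny ≠ "" then part ++ "**denied:**" ++ deny ++ "\n" else part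

def pvKeys (rp : List (Int × String × String × String × String)) : List (Int × String) :=
  PySem.List.sorted (PySem.Set.ofList (rp.map (fun r => (r.1, r.2.2.2.1)))) (fun k => toLex k)

def pvGroup (rp : List (Int × String × String × String × String)) (k : Int × String) :
    List (Int × String × String × String × String) :=
  PySem.List.sorted (rp.filter (fun r => (r.1, r.2.2.2.1) == k))
    (fun r => toLex (r.2.1, r.2.2.2.2))

def pvCanon (rp : List (Int × String × String × String × String)) : String :=
  (pvKeys rp).foldr (fun k acc => pvGroupStr k (pvGroup rp k) ++ acc) ""

-- ---- B's scan consumes exactly one key-class per step ----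

theorem pv_emit_flatMap (ks : List (Int × String))
    (g : (Int × String) → List (Int × String × String × String × String))
    (hkey : ∀ k, ∀ r ∈ g k, (r.1, r.2.2.2.1) = k)
    (hne : ∀ k ∈ ks, g k ≠ []) (hnd : ks.Pairwise (· ≠ ·)) :
    pvEmit (ks.flatMap g) = ks.foldr (fun k acc => pvGroupStr k (g k) ++ acc) "" := by
  induction ks with
  | nil => simp [pvEmit]
  | cons k ks ih =>
    obtain ⟨r0, t0, hg⟩ : ∃ r0 t0, g k = r0 :: t0 := by
      cases h : g k with
      | nil => exact absurd h (hne k (by simp))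
      | cons a b => exact ⟨a, b, rfl⟩
    have hr0 : (r0.1, r0.2.2.2.1) = k := hkey k r0 (by rw [hg]; simp)
    have hsame : ∀ x ∈ t0, (fun x => x.1 == r0.1 && x.2.2.2.1 == r0.2.2.2.1) x = true := by
      intro x hx
      have hx' : (x.1, x.2.2.2.1) = k := hkey k x (by rw [hg]; simp [hx])
      have h1 : x.1 = r0.1 := by
        have := hx'.trans hr0.symm
        exact (Prod.mk.injEq _ _ _ _ ▸ this).1
      have h2 : x.2.2.2.1 = r0.2.2.2.1 := by
        have := hx'.trans hr0.symm
        exact (Prod.mk.injEq _ _ _ _ ▸ this).2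
      simp [h1, h2]
    have hrest : ∀ y ∈ ks.flatMap g, (fun x => x.1 == r0.1 && x.2.2.2.1 == r0.2.2.2.1) y = false := by
      intro y hy
      rcases List.mem_flatMap.mp hy with ⟨k', hk', hy'⟩
      have hy'' : (y.1, y.2.2.2.1) = k' := hkey k' y hy'
      have hkk' : k ≠ k' := (List.pairwise_cons.mp hnd).1 k' hk'
      by_contra hcon
      simp only [Bool.not_eq_false, Bool.and_eq_true, beq_iff_eq] at hcon
      exact hkk' (by rw [← hr0, ← hy'', hcon.1, hcon.2])
    simp only [List.flatMap_cons, hg, List.cons_append]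
    rw [pvEmit]
    simp only [pv_takeWhile_append_all _ t0 _ hsame, pv_takeWhile_all_false _ _ hrest,
      pv_dropWhile_append_all _ t0 _ hsame, pv_dropWhile_all_false _ _ hrest,
      List.append_nil]
    rw [ih (fun k' hk' => hne k' (by simp [hk'])) (List.pairwise_cons.mp hnd).2]
    simp only [List.foldr_cons]
    have hk1 : r0.1 = k.1 := by rw [← hr0]
    have hk2 : r0.2.2.2.1 = k.2 := by rw [← hr0]
    rw [pvGroupStr, hg, hk1, hk2]

-- ---- A reaches the normal form ----

theorem pv_allowlist_eq (rp : List (Int × String × String × String × String))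
    (k : Int × String) (c : String) :
    ((PySem.List.sorted2 ((rp.foldl pvStepA PySem.Dict.empty).getD k []) Prod.fst Prod.snd).filter
        (fun p => p.2 == c)).map (fun p => "`" ++ p.1 ++ "`")
      = ((pvGroup rp k).filter (fun x => x.2.2.2.2 == c)).map (fun x => "`" ++ x.2.1 ++ "`") := by
  rw [pv_groups_getD rp k, pv_sorted2_eq]
  rw [← pv_map_sorted (fun r => (r.2.1, r.2.2.2.2))
    (fun r => toLex (r.2.1, r.2.2.2.2)) (fun p => toLex (p.1, p.2)) (fun a => rfl)
    (rp.filter (fun r => (r.1, r.2.2.2.1) == k))]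
  simp [List.filter_map, List.map_map, Function.comp_def, pvGroup]

theorem pv_A_canon (rp : List (Int × String × String × String × String)) :
    (PySem.List.sorted2 (rp.foldl pvStepA PySem.Dict.empty).keys Prod.fst Prod.snd).foldl
      (fun stringval gk =>
        let allow := PySem.Str.join ","
          (((PySem.List.sorted2 ((rp.foldl pvStepA PySem.Dict.empty).getD gk []) Prod.fst Prod.snd).filter
              (fun p => p.2 == "allow")).map (fun p => "`" ++ p.1 ++ "`"))
        let deny := PySem.Str.join ","
          (((PySem.List.sorted2 ((rp.foldl pvStepA PySem.Dict.empty).getD gk []) Prod.fst Prod.snd).filter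
              (fun p => p.2 == "deny")).map (fun p => "`" ++ p.1 ++ "`"))
        let stringval := stringval ++ "\n" ++ PySem.Int.toStr gk.1 ++ " (" ++ gk.2 ++ "):\n"
        let stringval := if allow ≠ "" then stringval ++ "**allowed:**" ++ allow ++ "\n" else stringval
        if deny ≠ "" then stringval ++ "**denied:**" ++ deny ++ "\n" else stringval) ""
      = pvCanon rp := by
  have hkeys : PySem.List.sorted2 (rp.foldl pvStepA PySem.Dict.empty).keys Prod.fst Prod.snd
      = pvKeys rp := by
    rw [pv_groups_keys, pv_sorted2_eq, pvKeys]
  have hbody : (fun (stringval : String) (gk : Int × String) =>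
        let allow := PySem.Str.join ","
          (((PySem.List.sorted2 ((rp.foldl pvStepA PySem.Dict.empty).getD gk []) Prod.fst Prod.snd).filter
              (fun p => p.2 == "allow")).map (fun p => "`" ++ p.1 ++ "`"))
        let deny := PySem.Str.join ","
          (((PySem.List.sorted2 ((rp.foldl pvStepA PySem.Dict.empty).getD gk []) Prod.fst Prod.snd).filter
              (fun p => p.2 == "deny")).map (fun p => "`" ++ p.1 ++ "`"))
        let stringval := stringval ++ "\n" ++ PySem.Int.toStr gk.1 ++ " (" ++ gk.2 ++ "):\n"
        let stringval := if allow ≠ "" then stringval ++ "**allowed:**" ++ allow ++ "\n" else stringval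
        if deny ≠ "" then stringval ++ "**denied:**" ++ deny ++ "\n" else stringval)
      = (fun s gk => s ++ pvGroupStr gk (pvGroup rp gk)) := by
    funext s gk
    simp only [pv_allowlist_eq rp gk, pvGroupStr]
    split_ifs <;> simp [String.append_assoc]
  rw [hkeys, hbody, pv_foldl_append_str, pvCanon, String.empty_append]

-- ---- B reaches the normal form ----

theorem pv_keys_pairwise (rp : List (Int × String × String × String × String)) :
    ((pvKeys rp).map toLex).Pairwise (· < ·) := by
  have hnd : (pvKeys rp).Nodup :=
    (PySem.List.sorted_perm _ _ _).symm.nodup (PySem.Set.nodup_ofList _)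
  have hle : (pvKeys rp).Pairwise (fun a b => toLex a ≤ toLex b) :=
    PySem.List.sorted_pairwise _ _
  rw [List.pairwise_map]
  exact (hle.and hnd).imp (fun h => lt_of_le_of_ne h.1 (fun he => h.2 (toLex_inj.mp he)))

theorem pv_B_canon (rp : List (Int × String × String × String × String)) :
    pvEmit (PySem.List.sorted2
      (PySem.List.sorted2 rp (fun r => r.2.1) (fun r => r.2.2.2.2))
      (fun r => r.1) (fun r => r.2.2.2.1)) = pvCanon rp := by
  rw [pv_sorted2_eq, pv_sorted2_eq]
  rw [pv_sorted_flatMap (PySem.List.sorted rp (fun r => toLex (r.2.1, r.2.2.2.2)))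
    (fun r => toLex (r.1, r.2.2.2.1)) ((pvKeys rp).map toLex)
    (pv_keys_pairwise rp)
    (fun r hr => by
      rw [List.mem_map]
      refine ⟨(r.1, r.2.2.2.1), ?_, rfl⟩
      rw [pvKeys, PySem.List.mem_sorted, PySem.Set.mem_ofList]
      exact List.mem_map_of_mem ((PySem.List.mem_sorted _ _ _ r).mp hr))]
  rw [List.flatMap_map]
  have hgrp : ∀ k : Int × String,
      (PySem.List.sorted rp (fun r => toLex (r.2.1, r.2.2.2.2))).filter
          (fun r => decide (toLex (r.1, r.2.2.2.1) = toLex k))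
        = pvGroup rp k := by
    intro k
    rw [List.filter_congr (fun r _ => by
      show decide (toLex (r.1, r.2.2.2.1) = toLex k) = ((r.1, r.2.2.2.1) == k)
      by_cases h : (r.1, r.2.2.2.1) = k <;> simp [h])]
    rw [pv_filter_sorted, pvGroup]
  rw [List.flatMap_congr (fun k _ => hgrp k)]
  rw [pv_emit_flatMap (pvKeys rp) (pvGroup rp)
    (fun k r hr => by
      have := (List.mem_filter.mp ((PySem.List.mem_sorted _ _ _ r).mp hr)).2
      exact beq_iff_eq.mp this)
    (fun k hk => by
      rw [pvGroup, Ne, PySem.List.sorted_eq_nil_iff]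
      have hk' : k ∈ rp.map (fun r => (r.1, r.2.2.2.1)) := by
        rw [pvKeys, PySem.List.mem_sorted, PySem.Set.mem_ofList] at hk
        exact hk
      rcases List.mem_map.mp hk' with ⟨r, hr, hrk⟩
      intro hnil
      have : r ∈ rp.filter (fun r => (r.1, r.2.2.2.1) == k) :=
        List.mem_filter.mpr ⟨hr, by simp [hrk]⟩
      rw [hnil] at this
      simp at this)
    ((PySem.List.sorted_perm _ _ _).symm.nodup (PySem.Set.nodup_ofList _))]
  rfl

-- ===== VERDICT (by name: the statement is the Claim_ definition above) =====
theorem format_resolved_permissions_spec : Claim_equal_format_resolved_permissions := by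
  intro rp _
  show format_resolved_permissions rp = format_resolved_permissions_alt rp
  rw [format_resolved_permissions, format_resolved_permissions_alt]
  simp only []
  rw [pv_A_canon rp, pv_B_canon rp]
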